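-- pv_equiv track=rewrite | github.com/martian17/qiskit-graph-coloring-hamiltonian | edge_coloring.py | separateColors
-- ===== SOURCE A (Python) =====
-- def initSquareMatrix(n):
--     mat = []
--     for i in range(n):
--         mat.append([])
--         for j in range(n):
--             mat[i].append(0)
--     return mat
--
-- def separateColors(colmat,n,original):
--     retvals = []
--     for col in range(1,n+1):
--         onecolmat = initSquareMatrix(len(colmat))
--         for i in range(len(colmat)):
--             for j in range(len(colmat)):# including the loopback
--                 if col == colmat[i][j]:
--                     onecolmat[i][j] = original[i][j]
--         retvals.append(onecolmat)
--     return retvals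
-- ===== SOURCE B (Python) =====
-- def separateColors(colmat, n, original):
--     m = len(colmat)
--     retvals = [[[0] * m for _ in range(m)] for _ in range(n)]
--     for i in range(m):
--         for j in range(m):
--             c = colmat[i][j]
--             if 1 <= c <= n:
--                 retvals[c - 1][i][j] = original[i][j]
--     return retvals
-- ===== Notes on version B (the rewrite author's own statement) =====
-- stated objective: alternative
-- what changed: Instead of A's n full rescans of colmat (one scan per color, each writing into a freshly built matrix), B allocates all n zero matrices up front and makes a single pass over colmat, dispatching each entry with color c (1 <= c <= n) into matrix c-1.
-- outside the precondition, e.g. on separateColors([[]], 0, []): A returns [], B raises IndexError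
import Mathlib
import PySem

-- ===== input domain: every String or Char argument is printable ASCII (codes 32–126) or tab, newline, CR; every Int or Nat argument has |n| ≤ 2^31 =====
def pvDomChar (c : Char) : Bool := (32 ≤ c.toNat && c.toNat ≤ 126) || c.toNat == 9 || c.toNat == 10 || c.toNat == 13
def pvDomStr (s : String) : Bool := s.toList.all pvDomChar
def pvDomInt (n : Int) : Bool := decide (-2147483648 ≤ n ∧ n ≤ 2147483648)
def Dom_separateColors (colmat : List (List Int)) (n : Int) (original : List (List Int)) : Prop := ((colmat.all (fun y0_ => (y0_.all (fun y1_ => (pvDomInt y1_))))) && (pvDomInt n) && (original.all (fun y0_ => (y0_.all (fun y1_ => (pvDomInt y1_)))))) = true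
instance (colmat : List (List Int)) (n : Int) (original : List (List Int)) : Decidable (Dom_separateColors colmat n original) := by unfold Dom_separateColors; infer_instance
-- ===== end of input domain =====

-- B replaces A's n full rescans of colmat (one per color) by one scan that dispatches each
-- entry into its color's matrix; equivalence of the return values is proved on Pre_.

-- ===== PORT A =====
def initSquareMatrix (n : Int) : List (List Int) :=
  (PySem.List.pyRange 0 n).foldl
    (fun mat i =>
      (PySem.List.pyRange 0 n).foldl
        (fun mat _j => PySem.List.pySetD mat i (PySem.List.pyGetD mat i [] ++ [(0 : Int)]))
        (mat ++ [([] : List Int)]))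
    []

def separateColors (colmat : List (List Int)) (n : Int) (original : List (List Int)) : List (List (List Int)) :=
  (PySem.List.pyRange 1 (n + 1)).foldl
    (fun retvals col =>
      let onecolmat := initSquareMatrix ((colmat.length : Int))
      let onecolmat :=
        (PySem.List.pyRange 0 (colmat.length : Int)).foldl
          (fun one i =>
            (PySem.List.pyRange 0 (colmat.length : Int)).foldl
              (fun one j =>
                if col = PySem.List.pyGetD (PySem.List.pyGetD colmat i []) j 0 then
                  PySem.List.pySetD one i
                    (PySem.List.pySetD (PySem.List.pyGetD one i []) j
                      (PySem.List.pyGetD (PySem.List.pyGetD original i []) j 0))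
                else one)
              one)
          onecolmat
      retvals ++ [onecolmat])
    []

-- ===== PORT B =====
def separateColors_alt (colmat : List (List Int)) (n : Int) (original : List (List Int)) : List (List (List Int)) :=
  let m : Int := (colmat.length : Int)
  let retvals :=
    (PySem.List.pyRange 0 n).map
      (fun _ => (PySem.List.pyRange 0 m).map (fun _ => PySem.List.pyRepeat [(0 : Int)] m))
  (PySem.List.pyRange 0 m).foldl
    (fun rv i =>
      (PySem.List.pyRange 0 m).foldl
        (fun rv j =>
          let c := PySem.List.pyGetD (PySem.List.pyGetD colmat i []) j 0
          if 1 ≤ c ∧ c ≤ n then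
            PySem.List.pySetD rv (c - 1)
              (PySem.List.pySetD (PySem.List.pyGetD rv (c - 1) []) i
                (PySem.List.pySetD (PySem.List.pyGetD (PySem.List.pyGetD rv (c - 1) []) i []) j
                  (PySem.List.pyGetD (PySem.List.pyGetD original i []) j 0)))
          else rv)
        rv)
    retvals

-- ===== PRECONDITION & SPEC =====
-- Pre_ excludes the inputs on which either Python raises an IndexError: a colmat row shorter
-- than len(colmat), or an in-range color sitting at a position missing from original.  The
-- only excluded inputs on which A still RETURNS are n < 1 with a ragged colmat (A's loop is
-- then empty and returns [], while B's single pass still reads colmat[i][j] and raises).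
def Pre_separateColors (colmat : List (List Int)) (n : Int) (original : List (List Int)) : Prop :=
  (∀ row ∈ colmat, colmat.length ≤ row.length) ∧
  (∀ i < colmat.length, ∀ j < colmat.length,
    (1 ≤ (colmat.getD i []).getD j 0 ∧ (colmat.getD i []).getD j 0 ≤ n) →
      i < original.length ∧ j < (original.getD i []).length)
instance (colmat : List (List Int)) (n : Int) (original : List (List Int)) : Decidable (Pre_separateColors colmat n original) := by unfold Pre_separateColors; infer_instance

def pvWitness_separateColors : List (List Int) × Int × List (List Int) :=
  ([[1, 2], [2, 0]], 2, [[5, 6], [7, 8]])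

def Spec_separateColors (colmat : List (List Int)) (n : Int) (original : List (List Int)) (out : List (List (List Int))) : Prop := out = separateColors_alt colmat n original
instance (colmat : List (List Int)) (n : Int) (original : List (List Int)) (out : List (List (List Int))) : Decidable (Spec_separateColors colmat n original out) := by unfold Spec_separateColors; infer_instance

-- ===== CLAIM (what is proved, stated in full; the proofs are below) =====
def Claim_equal_separateColors : Prop := ∀ (colmat : List (List Int)) (n : Int) (original : List (List Int)), Dom_separateColors colmat n original → Pre_separateColors colmat n original → Spec_separateColors colmat n original (separateColors colmat n original)

-- ===== LEMMAS AND PROOFS =====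


lemma pv_pyRange_one_plus (n : Int) :
    PySem.List.pyRange 1 (n + 1) = (List.range n.toNat).map (fun k : Nat => ((k : Int) + 1)) := by
  rw [PySem.List.pyRange_of_pos 1 (n + 1) one_pos]
  by_cases hn : (1 : Int) < n + 1
  · rw [if_pos hn]
    have h1 : ((n + 1 - 1 + 1 - 1) / 1).toNat = n.toNat := by omega
    rw [h1]
    exact List.map_congr_left (fun k _ => by omega)
  · rw [if_neg hn]
    have : n.toNat = 0 := by omega
    simp [this]

lemma pv_foldl_set_row {β : Type} (l : List β) (i : Nat) (f : List Int → β → List Int)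
    (one : List (List Int)) :
    l.foldl (fun m j => m.set i (f (m.getD i []) j)) one = one.set i (l.foldl f (one.getD i [])) := by
  induction l generalizing one with
  | nil =>
    simp only [List.foldl_nil]
    by_cases h : i < one.length
    · rw [List.getD_eq_getElem _ _ h, List.set_getElem_self]
    · rw [List.set_eq_of_length_le (by omega)]
  | cons j l ih =>
    simp only [List.foldl_cons]
    by_cases h : i < one.length
    · rw [ih]
      rw [List.set_set]
      congr 1
      rw [List.getD_eq_getElem (one.set i (f (one.getD i []) j)) _ (by simpa using h),
        List.getElem_set_self, List.getD_eq_getElem _ _ h]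
    · rw [List.set_eq_of_length_le (by omega), ih,
        List.set_eq_of_length_le (by omega), List.set_eq_of_length_le (by omega)]

lemma pv_append_zeros {β : Type} (l : List β) (r : List Int) :
    l.foldl (fun r _ => r ++ [(0 : Int)]) r = r ++ List.replicate l.length 0 := by
  induction l generalizing r with
  | nil => simp
  | cons b l ih => simp [ih, List.replicate_succ]

lemma pv_init_aux (m : Nat) : ∀ t : Nat,
    (List.range t).foldl
      (fun mat i => (mat ++ [([] : List Int)]).set i ((mat ++ [([] : List Int)]).getD i [] ++ List.replicate m 0))
      []
    = List.replicate t (List.replicate m 0) := by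
  intro t
  induction t with
  | zero => simp
  | succ t ih =>
    rw [List.range_succ, List.foldl_append, ih, List.foldl_cons, List.foldl_nil]
    have hg : (List.replicate t (List.replicate m (0 : Int)) ++ [[]]).getD t [] = [] := by
      rw [List.getD_eq_getElem _ _ (by simp)]
      simp
    rw [hg, List.nil_append]
    rw [List.set_append_right _ _ (by simp)]
    simp [← List.replicate_succ']

lemma pv_initSq (m : Nat) :
    initSquareMatrix (m : Int) = List.replicate m (List.replicate m 0) := by
  unfold initSquareMatrix
  simp only [PySem.List.pyRange_zero_natCast, List.foldl_map, PySem.List.pySetD_natCast,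
    PySem.List.pyGetD_natCast]
  have hbody : ∀ (mat : List (List Int)) (i : Nat),
      (List.range m).foldl
        (fun mat _ => mat.set i (mat.getD i [] ++ [(0 : Int)]))
        (mat ++ [([] : List Int)])
      = (mat ++ [([] : List Int)]).set i ((mat ++ [([] : List Int)]).getD i [] ++ List.replicate m 0) := by
    intro mat i
    rw [pv_foldl_set_row (List.range m) i (fun r _ => r ++ [(0 : Int)]), pv_append_zeros,
      List.length_range]
  simp only [hbody]
  exact pv_init_aux m m


def pvMat (colmat original : List (List Int)) (col : Int) (P : List (Nat × Nat)) : List (List Int) :=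
  (List.range colmat.length).map (fun a =>
    (List.range colmat.length).map (fun b =>
      if (colmat.getD a []).getD b 0 = col ∧ (a, b) ∈ P then (original.getD a []).getD b 0 else 0))

lemma pv_pvMat_nil (colmat original : List (List Int)) (col : Int) :
    pvMat colmat original col [] = List.replicate colmat.length (List.replicate colmat.length 0) := by
  unfold pvMat
  simp [List.map_const']

lemma pv_pvMat_getD (colmat original : List (List Int)) (col : Int) (P : List (Nat × Nat))
    {i : Nat} (hi : i < colmat.length) :
    (pvMat colmat original col P).getD i []
      = (List.range colmat.length).map (fun b =>
          if (colmat.getD i []).getD b 0 = col ∧ (i, b) ∈ P then (original.getD i []).getD b 0 else 0) := by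
  unfold pvMat
  rw [List.getD_eq_getElem _ _ (by simpa using hi)]
  simp

lemma pv_pvMat_append_other (colmat original : List (List Int)) (col : Int) (P : List (Nat × Nat))
    {i j : Nat} (hc : (colmat.getD i []).getD j 0 ≠ col) :
    pvMat colmat original col (P ++ [(i, j)]) = pvMat colmat original col P := by
  unfold pvMat
  refine List.map_congr_left (fun a _ => ?_)
  refine List.map_congr_left (fun b _ => ?_)
  by_cases hcc : (colmat.getD a []).getD b 0 = col
  · have hne : ((a, b) : Nat × Nat) ≠ (i, j) := by
      intro h
      obtain ⟨h1, h2⟩ := Prod.ext_iff.mp h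
      simp only at h1 h2
      subst h1; subst h2
      exact hc hcc
    simp only [List.mem_append, List.mem_singleton, hne, or_false]
  · rw [if_neg (fun h => hcc h.1), if_neg (fun h => hcc h.1)]

lemma pv_pvMat_append_self (colmat original : List (List Int)) (col : Int) (P : List (Nat × Nat))
    {i j : Nat} (hi : i < colmat.length)
    (hc : (colmat.getD i []).getD j 0 = col) :
    (pvMat colmat original col P).set i
        (((pvMat colmat original col P).getD i []).set j ((original.getD i []).getD j 0))
      = pvMat colmat original col (P ++ [(i, j)]) := by
  rw [pv_pvMat_getD colmat original col P hi]
  apply List.ext_getElem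
  · simp [pvMat]
  · intro a ha1 ha2
    simp only [pvMat, List.getElem_set, List.getElem_map, List.getElem_range] at *
    by_cases hai : i = a
    · rw [if_pos hai]
      subst hai
      apply List.ext_getElem
      · simp
      · intro b hb1 hb2
        simp only [List.getElem_set, List.getElem_map, List.getElem_range] at *
        by_cases hbj : j = b
        · rw [if_pos hbj]
          subst hbj
          have hmem : (colmat.getD i []).getD j 0 = col ∧ ((i, j) : Nat × Nat) ∈ P ++ [(i, j)] :=
            ⟨hc, by simp⟩
          rw [if_pos hmem]
        · rw [if_neg hbj]
          have hne : ((i, b) : Nat × Nat) ≠ (i, j) := by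
            intro h
            exact hbj (Prod.ext_iff.mp h).2.symm
          simp only [List.mem_append, List.mem_singleton, hne, or_false]
    · rw [if_neg hai]
      have hne : ∀ b : Nat, ((a, b) : Nat × Nat) ≠ (i, j) := by
        intro b h
        exact hai (Prod.ext_iff.mp h).1.symm
      refine List.map_congr_left (fun b _ => ?_)
      simp only [List.mem_append, List.mem_singleton, hne b, or_false]

-- all cell positions, in row-major order
def pvPairs (m : Nat) : List (Nat × Nat) :=
  (List.range m).flatMap (fun i => (List.range m).map (fun j => (i, j)))

-- A's outer-loop body, named so that the fold in `separateColors` matches definitionally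
def pvAmat (colmat original : List (List Int)) (col : Int) : List (List Int) :=
  (PySem.List.pyRange 0 (colmat.length : Int)).foldl
    (fun one i =>
      (PySem.List.pyRange 0 (colmat.length : Int)).foldl
        (fun one j =>
          if col = PySem.List.pyGetD (PySem.List.pyGetD colmat i []) j 0 then
            PySem.List.pySetD one i
              (PySem.List.pySetD (PySem.List.pyGetD one i []) j
                (PySem.List.pyGetD (PySem.List.pyGetD original i []) j 0))
          else one)
        one)
    (initSquareMatrix ((colmat.length : Int)))

lemma pv_stepA (colmat original : List (List Int)) (col : Int) (P : List (Nat × Nat))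
    {i j : Nat} (hi : i < colmat.length) :
    (if col = (colmat.getD i []).getD j 0 then
        (pvMat colmat original col P).set i
          (((pvMat colmat original col P).getD i []).set j ((original.getD i []).getD j 0))
      else pvMat colmat original col P)
      = pvMat colmat original col (P ++ [(i, j)]) := by
  by_cases hc : col = (colmat.getD i []).getD j 0
  · rw [if_pos hc, pv_pvMat_append_self colmat original col P hi hc.symm]
  · rw [if_neg hc, pv_pvMat_append_other colmat original col P (fun h => hc h.symm)]

lemma pv_A_inner (colmat original : List (List Int)) (col : Int) {i : Nat} (hi : i < colmat.length) :
    ∀ (J : List Nat) (P : List (Nat × Nat)),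
      J.foldl
        (fun one j =>
          if col = (colmat.getD i []).getD j 0 then
            one.set i ((one.getD i []).set j ((original.getD i []).getD j 0))
          else one)
        (pvMat colmat original col P)
      = pvMat colmat original col (P ++ J.map (fun j => (i, j))) := by
  intro J
  induction J with
  | nil => intro P; simp
  | cons j J ih =>
    intro P
    simp only [List.foldl_cons, List.map_cons]
    rw [pv_stepA colmat original col P hi, ih]
    simp

lemma pv_A_outer (colmat original : List (List Int)) (col : Int) :
    ∀ (I : List Nat), (∀ i ∈ I, i < colmat.length) → ∀ (P : List (Nat × Nat)),
      I.foldl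
        (fun one i =>
          (List.range colmat.length).foldl
            (fun one j =>
              if col = (colmat.getD i []).getD j 0 then
                one.set i ((one.getD i []).set j ((original.getD i []).getD j 0))
              else one)
            one)
        (pvMat colmat original col P)
      = pvMat colmat original col
          (P ++ I.flatMap (fun i => (List.range colmat.length).map (fun j => (i, j)))) := by
  intro I
  induction I with
  | nil => intro _ P; simp
  | cons i I ih =>
    intro hI P
    simp only [List.foldl_cons, List.flatMap_cons]
    rw [pv_A_inner colmat original col (hI i (by simp)) (List.range colmat.length) P,
      ih (fun x hx => hI x (by simp [hx]))]
    simp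

lemma pv_Amat_eq (colmat original : List (List Int)) (col : Int) :
    pvAmat colmat original col = pvMat colmat original col (pvPairs colmat.length) := by
  unfold pvAmat
  rw [pv_initSq]
  simp only [PySem.List.pyRange_zero_natCast, List.foldl_map, PySem.List.pySetD_natCast,
    PySem.List.pyGetD_natCast]
  rw [← pv_pvMat_nil colmat original col]
  rw [pv_A_outer colmat original col (List.range colmat.length) (by simp) []]
  simp [pvPairs]

lemma pv_A_eq (colmat : List (List Int)) (n : Int) (original : List (List Int)) :
    separateColors colmat n original
      = (List.range n.toNat).map
          (fun k : Nat => pvMat colmat original ((k : Int) + 1) (pvPairs colmat.length)) := by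
  have h0 : separateColors colmat n original
      = (PySem.List.pyRange 1 (n + 1)).foldl
          (fun retvals col => retvals ++ [pvAmat colmat original col]) [] := rfl
  rw [h0, PySem.List.foldl_append_singleton_eq_map, pv_pyRange_one_plus, List.map_map]
  simp only [List.nil_append, Function.comp_def, pv_Amat_eq]

-- B's state: the n per-color matrices after the positions in P have been processed
def pvState (colmat original : List (List Int)) (n0 : Nat) (P : List (Nat × Nat)) : List (List (List Int)) :=
  (List.range n0).map (fun k : Nat => pvMat colmat original ((k : Int) + 1) P)

lemma pv_state_nil (colmat original : List (List Int)) (n0 : Nat) :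
    pvState colmat original n0 []
      = List.replicate n0 (List.replicate colmat.length (List.replicate colmat.length 0)) := by
  unfold pvState
  simp [pv_pvMat_nil, List.map_const']

lemma pv_stepB (colmat original : List (List Int)) (n : Int) (P : List (Nat × Nat))
    {i j : Nat} (hi : i < colmat.length) :
    (if 1 ≤ (colmat.getD i []).getD j 0 ∧ (colmat.getD i []).getD j 0 ≤ n then
        PySem.List.pySetD (pvState colmat original n.toNat P) ((colmat.getD i []).getD j 0 - 1)
          ((PySem.List.pyGetD (pvState colmat original n.toNat P) ((colmat.getD i []).getD j 0 - 1) []).set i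
            (((PySem.List.pyGetD (pvState colmat original n.toNat P) ((colmat.getD i []).getD j 0 - 1) []).getD i []).set j
              ((original.getD i []).getD j 0)))
      else pvState colmat original n.toNat P)
      = pvState colmat original n.toNat (P ++ [(i, j)]) := by
  by_cases hg : 1 ≤ (colmat.getD i []).getD j 0 ∧ (colmat.getD i []).getD j 0 ≤ n
  · rw [if_pos hg]
    obtain ⟨hg1, hg2⟩ := hg
    have hcast : (colmat.getD i []).getD j 0 - 1 = (((colmat.getD i []).getD j 0 - 1).toNat : Int) := by
      omega
    set k0 := ((colmat.getD i []).getD j 0 - 1).toNat with hk0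
    have hk0lt : k0 < n.toNat := by omega
    have hcol : (k0 : Int) + 1 = (colmat.getD i []).getD j 0 := by omega
    rw [hcast]
    simp only [PySem.List.pySetD_natCast, PySem.List.pyGetD_natCast]
    have hgetD : (pvState colmat original n.toNat P).getD k0 []
        = pvMat colmat original ((k0 : Int) + 1) P := by
      unfold pvState
      rw [List.getD_eq_getElem _ _ (by simpa using hk0lt)]
      simp
    rw [hgetD, pv_pvMat_append_self colmat original _ P hi hcol.symm]
    apply List.ext_getElem
    · simp [pvState]
    · intro a ha1 ha2
      simp only [pvState, List.getElem_set, List.getElem_map, List.getElem_range] at *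
      by_cases hak : k0 = a
      · rw [if_pos hak]
        subst hak
        rfl
      · rw [if_neg hak]
        have hne : (colmat.getD i []).getD j 0 ≠ (a : Int) + 1 := by omega
        rw [pv_pvMat_append_other colmat original _ P hne]
  · rw [if_neg hg]
    unfold pvState
    refine (List.map_congr_left (fun k hk => ?_)).symm
    have hkn : k < n.toNat := List.mem_range.mp hk
    have hne : (colmat.getD i []).getD j 0 ≠ (k : Int) + 1 := by
      rcases not_and_or.mp hg with h | h <;> omega
    rw [pv_pvMat_append_other colmat original _ P hne]

lemma pv_B_inner (colmat original : List (List Int)) (n : Int) {i : Nat} (hi : i < colmat.length) :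
    ∀ (J : List Nat) (P : List (Nat × Nat)),
      J.foldl
        (fun rv j =>
          if 1 ≤ (colmat.getD i []).getD j 0 ∧ (colmat.getD i []).getD j 0 ≤ n then
            PySem.List.pySetD rv ((colmat.getD i []).getD j 0 - 1)
              ((PySem.List.pyGetD rv ((colmat.getD i []).getD j 0 - 1) []).set i
                (((PySem.List.pyGetD rv ((colmat.getD i []).getD j 0 - 1) []).getD i []).set j
                  ((original.getD i []).getD j 0)))
          else rv)
        (pvState colmat original n.toNat P)
      = pvState colmat original n.toNat (P ++ J.map (fun j => (i, j))) := by
  intro J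
  induction J with
  | nil => intro P; simp
  | cons j J ih =>
    intro P
    simp only [List.foldl_cons, List.map_cons]
    rw [pv_stepB colmat original n P hi, ih]
    simp

lemma pv_B_outer (colmat original : List (List Int)) (n : Int) :
    ∀ (I : List Nat), (∀ i ∈ I, i < colmat.length) → ∀ (P : List (Nat × Nat)),
      I.foldl
        (fun rv i =>
          (List.range colmat.length).foldl
            (fun rv j =>
              if 1 ≤ (colmat.getD i []).getD j 0 ∧ (colmat.getD i []).getD j 0 ≤ n then
                PySem.List.pySetD rv ((colmat.getD i []).getD j 0 - 1)
                  ((PySem.List.pyGetD rv ((colmat.getD i []).getD j 0 - 1) []).set i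
                    (((PySem.List.pyGetD rv ((colmat.getD i []).getD j 0 - 1) []).getD i []).set j
                      ((original.getD i []).getD j 0)))
              else rv)
            rv)
        (pvState colmat original n.toNat P)
      = pvState colmat original n.toNat
          (P ++ I.flatMap (fun i => (List.range colmat.length).map (fun j => (i, j)))) := by
  intro I
  induction I with
  | nil => intro _ P; simp
  | cons i I ih =>
    intro hI P
    simp only [List.foldl_cons, List.flatMap_cons]
    rw [pv_B_inner colmat original n (hI i (by simp)) (List.range colmat.length) P,
      ih (fun x hx => hI x (by simp [hx]))]
    simp

lemma pv_B_eq (colmat : List (List Int)) (n : Int) (original : List (List Int)) :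
    separateColors_alt colmat n original
      = (List.range n.toNat).map
          (fun k : Nat => pvMat colmat original ((k : Int) + 1) (pvPairs colmat.length)) := by
  have hinit : (PySem.List.pyRange 0 n).map
      (fun _ => (PySem.List.pyRange 0 (colmat.length : Int)).map
        (fun _ => PySem.List.pyRepeat [(0 : Int)] (colmat.length : Int)))
      = pvState colmat original n.toNat [] := by
    rw [pv_state_nil]
    have hlen : (PySem.List.pyRange 0 n).length = n.toNat := by
      by_cases h : 0 < n
      · have hn : n = (n.toNat : Int) := by omega
        rw [hn, PySem.List.pyRange_zero_natCast]
        simp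
        omega
      · rw [PySem.List.pyRange_of_pos 0 n one_pos]
        have h2 : ¬ (0 : Int) < n := by omega
        simp [h2]
        omega
    have hinner : (PySem.List.pyRange 0 (colmat.length : Int)).map
        (fun _ => PySem.List.pyRepeat [(0 : Int)] (colmat.length : Int))
        = List.replicate colmat.length (List.replicate colmat.length 0) := by
      rw [List.map_const', PySem.List.pyRepeat_singleton, PySem.List.pyRange_zero_natCast]
      simp
    rw [List.map_const', hinner, hlen]
  simp only [separateColors_alt]
  rw [hinit]
  simp only [PySem.List.pyRange_zero_natCast, List.foldl_map, PySem.List.pySetD_natCast,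
    PySem.List.pyGetD_natCast]
  rw [pv_B_outer colmat original n (List.range colmat.length) (by simp) []]
  simp [pvState, pvPairs]

-- ===== VERDICT (by name: the statement is the Claim_ definition above) =====
theorem separateColors_spec : Claim_equal_separateColors := by
  intro colmat n original _ _
  unfold Spec_separateColors
  rw [pv_A_eq, pv_B_eq]
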